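-- pv_equiv track=rewrite | github.com/yifor01/CSC-OCR-competition | rec_pred.py | yi_merge
-- ===== SOURCE A (Python) =====
-- def yi_merge(res_map,methods=['orig','force180','blur','contrast']):
--     _pred = {}
--     for _id,_c in res_map.items():
--         tmp = []
--         for method in methods:
--             tmp.extend(_c[method])
--         tmp = sorted(tmp,key=lambda x : x[1],reverse=True)
--         _pred[_id] = tmp[0][0]
--     return _pred
-- ===== SOURCE B (Python) =====
-- def yi_merge(res_map, methods=['orig','force180','blur','contrast']):
--     _pred = {}
--     for _id, _c in res_map.items():
--         best = None
--         for method in methods: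
--             for x in _c[method]:
--                 if best is None or x[1] > best[1]:
--                     best = x
--         _pred[_id] = best[0]
--     return _pred
-- ===== Notes on version B (the rewrite author's own statement) =====
-- stated objective: faster
-- what changed: Per id, A concatenates all method lists and reverse-sorts them by score to take the first element; B keeps a single running best (strict > comparison, so the first maximal candidate wins as in A's stable sort) while streaming over the candidates, with no intermediate list and no sort.
import Mathlib
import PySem

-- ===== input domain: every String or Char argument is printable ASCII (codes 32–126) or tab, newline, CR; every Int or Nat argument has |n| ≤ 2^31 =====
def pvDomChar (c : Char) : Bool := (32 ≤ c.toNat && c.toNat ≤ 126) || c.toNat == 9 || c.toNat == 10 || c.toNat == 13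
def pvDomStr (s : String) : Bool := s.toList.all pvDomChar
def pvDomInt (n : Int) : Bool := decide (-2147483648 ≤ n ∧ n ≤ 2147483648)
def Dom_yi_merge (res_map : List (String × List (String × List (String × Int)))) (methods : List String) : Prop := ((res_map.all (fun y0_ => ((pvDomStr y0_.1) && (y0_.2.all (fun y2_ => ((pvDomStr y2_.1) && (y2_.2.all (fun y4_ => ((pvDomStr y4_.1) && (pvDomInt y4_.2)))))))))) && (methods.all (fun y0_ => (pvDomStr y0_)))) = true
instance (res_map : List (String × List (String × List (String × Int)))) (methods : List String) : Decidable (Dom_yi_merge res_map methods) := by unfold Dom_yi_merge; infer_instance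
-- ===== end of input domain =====

-- B replaces A's per-id reverse sort of the concatenated candidate list by a single
-- running-max scan with a strict comparison (same first-maximal tie-break); objective: faster.

-- ===== PORT A =====
-- _c[method]; the KeyError case (method absent) is outside Pre_, where getD's [] default is never reached
def pvLookup (c : List (String × List (String × Int))) (m : String) : List (String × Int) :=
  (PySem.Dict.mk c).getD m []

def yi_merge (res_map : List (String × List (String × List (String × Int)))) (methods : List String) : List (String × String) :=
  (res_map.foldl (fun pred p =>
      let tmp := methods.foldl (fun tmp m => tmp ++ pvLookup p.2 m) []
      let tmps := PySem.List.sorted tmp (fun x => x.2) true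
      match PySem.List.pyGet? tmps 0 with   -- tmp[0]; none = IndexError, outside Pre_
      | some x => pred.insert p.1 x.1
      | none => pred)
    PySem.Dict.empty).items

-- ===== PORT B =====
-- 'if best is None or x[1] > best[1]: best = x'
def pvBest (best : Option (String × Int)) (x : String × Int) : Option (String × Int) :=
  match best with
  | none => some x
  | some b => if b.2 < x.2 then some x else some b

def yi_merge_alt (res_map : List (String × List (String × List (String × Int)))) (methods : List String) : List (String × String) :=
  (res_map.foldl (fun pred p =>
      let best := methods.foldl (fun best m => (pvLookup p.2 m).foldl pvBest best) none
      match best with   -- best[0]; none = TypeError (all lists empty), outside Pre_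
      | some b => pred.insert p.1 b.1
      | none => pred)
    PySem.Dict.empty).items

-- ===== PRECONDITION & SPEC =====
-- Pre_ excludes exactly the inputs where A raises: an id whose dict misses some method (KeyError)
-- or whose candidate lists are all empty (IndexError on tmp[0]); B raises there too.
def Pre_yi_merge (res_map : List (String × List (String × List (String × Int)))) (methods : List String) : Prop :=
  ∀ p ∈ res_map, (∀ m ∈ methods, (PySem.Dict.mk p.2).contains m = true) ∧
    (∃ m ∈ methods, pvLookup p.2 m ≠ [])
instance (res_map : List (String × List (String × List (String × Int)))) (methods : List String) : Decidable (Pre_yi_merge res_map methods) := by unfold Pre_yi_merge; infer_instance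

def pvWitness_yi_merge : (List (String × List (String × List (String × Int)))) × List String :=
  ([("a", [("m", [("x", 1), ("y", 2)])])], ["m"])

def Spec_yi_merge (res_map : List (String × List (String × List (String × Int)))) (methods : List String) (out : List (String × String)) : Prop := out = yi_merge_alt res_map methods
instance (res_map : List (String × List (String × List (String × Int)))) (methods : List String) (out : List (String × String)) : Decidable (Spec_yi_merge res_map methods out) := by unfold Spec_yi_merge; infer_instance

-- ===== CLAIM (what is proved, stated in full; the proofs are below) =====
def Claim_equal_yi_merge : Prop := ∀ (res_map : List (String × List (String × List (String × Int)))) (methods : List String), Dom_yi_merge res_map methods → Pre_yi_merge res_map methods → Spec_yi_merge res_map methods (yi_merge res_map methods)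

-- ===== LEMMAS AND PROOFS =====

-- head of one insertBy step is exactly one running-max step
theorem pv_head_insertBy (x : String × Int) (l : List (String × Int)) :
    (PySem.List.insertBy (fun a b => decide ((b.2 : Int) < a.2)) x l).head? =
      pvBest l.head? x := by
  cases l with
  | nil => simp [PySem.List.insertBy, pvBest]
  | cons y ys =>
    by_cases h : (y.2 : Int) < x.2 <;> simp [PySem.List.insertBy, pvBest, h]

-- head of the insertion-sort fold computes the running max
theorem pv_head_foldl_insertBy :
    ∀ (xs acc : List (String × Int)),
      (xs.foldl (fun a x => PySem.List.insertBy (fun a b => decide ((b.2 : Int) < a.2)) x a) acc).head? =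
        xs.foldl pvBest acc.head? := by
  intro xs
  induction xs with
  | nil => intro acc; simp
  | cons x xs ih =>
    intro acc
    simp only [List.foldl_cons, ih, pv_head_insertBy x acc]

-- first element of the stable reverse sort = the strict running max (first maximal element)
theorem pv_head_sorted_rev (xs : List (String × Int)) :
    (PySem.List.sorted xs (fun x => x.2) true).head? = xs.foldl pvBest none := by
  rw [PySem.List.sorted_rev_eq_foldl_insertBy]
  simpa using pv_head_foldl_insertBy xs []

-- B's nested fold over the method lists = the fold over A's concatenated tmp
theorem pv_nested_foldl (f : String → List (String × Int)) :
    ∀ (ms : List String) (b : Option (String × Int)) (t : List (String × Int)),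
      ms.foldl (fun best m => (f m).foldl pvBest best) (t.foldl pvBest b) =
        (ms.foldl (fun tmp m => tmp ++ f m) t).foldl pvBest b := by
  intro ms
  induction ms with
  | nil => intro b t; simp
  | cons m ms ih =>
    intro b t
    simp only [List.foldl_cons, ← List.foldl_append, ih]

theorem pv_tmp_ne_nil (p2 : List (String × List (String × Int))) (methods : List String)
    (h : ∃ m ∈ methods, pvLookup p2 m ≠ []) :
    ∀ t : List (String × Int),
      methods.foldl (fun tmp m => tmp ++ pvLookup p2 m) t ≠ [] := by
  induction methods with
  | nil => simp at h
  | cons m ms ih =>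
    intro t
    simp only [List.foldl_cons]
    rcases h with ⟨m', hm', hne⟩
    rcases List.mem_cons.1 hm' with rfl | hmem
    · -- the nonempty list is already appended; the fold only extends on the right
      have grow : ∀ (l : List String) (s : List (String × Int)), s ≠ [] →
          l.foldl (fun tmp m => tmp ++ pvLookup p2 m) s ≠ [] := by
        intro l
        induction l with
        | nil => intro s hs; simpa using hs
        | cons a l ihl =>
          intro s hs
          simp only [List.foldl_cons]
          exact ihl _ (by simp [hs])
      exact grow ms _ (by simp [hne])
    · exact ih ⟨m', hmem, hne⟩ _

-- the per-id bodies of the two folds agree under the per-id precondition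
theorem pv_body_eq (p : String × List (String × List (String × Int))) (methods : List String)
    (hp : ∃ m ∈ methods, pvLookup p.2 m ≠ [])
    (pred : PySem.Dict String String) :
    (let tmp := methods.foldl (fun tmp m => tmp ++ pvLookup p.2 m) []
     let tmps := PySem.List.sorted tmp (fun x => x.2) true
     match PySem.List.pyGet? tmps 0 with
     | some x => pred.insert p.1 x.1
     | none => pred) =
    (let best := methods.foldl (fun best m => (pvLookup p.2 m).foldl pvBest best) none
     match best with
     | some b => pred.insert p.1 b.1
     | none => pred) := by
  have hbest : methods.foldl (fun best m => (pvLookup p.2 m).foldl pvBest best) none =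
      (methods.foldl (fun tmp m => tmp ++ pvLookup p.2 m) []).foldl pvBest none := by
    simpa using pv_nested_foldl (pvLookup p.2) methods none []
  have hne := pv_tmp_ne_nil p.2 methods hp []
  set tmp := methods.foldl (fun tmp m => tmp ++ pvLookup p.2 m) [] with htmp
  have hhead : (PySem.List.sorted tmp (fun x => x.2) true).head? = tmp.foldl pvBest none :=
    pv_head_sorted_rev tmp
  have hsne : PySem.List.sorted tmp (fun x => x.2) true ≠ [] := by
    rw [Ne, PySem.List.sorted_eq_nil_iff]; exact hne
  rcases hs : PySem.List.sorted tmp (fun x => x.2) true with _ | ⟨x, t⟩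
  · exact absurd hs hsne
  · rw [hs] at hhead
    simp only [List.head?] at hhead
    simp only [hs, hbest, ← hhead]
    simp [PySem.List.pyGet?, PySem.List.pyIdx?]

theorem pv_foldl_eq (res_map : List (String × List (String × List (String × Int)))) (methods : List String)
    (hpre : Pre_yi_merge res_map methods) :
    ∀ pred : PySem.Dict String String,
      res_map.foldl (fun pred p =>
          let tmp := methods.foldl (fun tmp m => tmp ++ pvLookup p.2 m) []
          let tmps := PySem.List.sorted tmp (fun x => x.2) true
          match PySem.List.pyGet? tmps 0 with
          | some x => pred.insert p.1 x.1
          | none => pred) pred =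
      res_map.foldl (fun pred p =>
          let best := methods.foldl (fun best m => (pvLookup p.2 m).foldl pvBest best) none
          match best with
          | some b => pred.insert p.1 b.1
          | none => pred) pred := by
  induction res_map with
  | nil => intro pred; rfl
  | cons p rest ih =>
    intro pred
    have hp := (hpre p (List.mem_cons_self)).2
    have hrest : Pre_yi_merge rest methods := fun q hq => hpre q (List.mem_cons_of_mem _ hq)
    simp only [List.foldl_cons]
    rw [pv_body_eq p methods hp pred]
    exact ih hrest _

-- ===== VERDICT (by name: the statement is the Claim_ definition above) =====
theorem yi_merge_spec : Claim_equal_yi_merge := by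
  intro res_map methods _ hpre
  unfold Spec_yi_merge yi_merge yi_merge_alt
  rw [pv_foldl_eq res_map methods hpre]
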